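-- pv_equiv track=rewrite | github.com/mk04366/Library_Recommendation | book_butler.py | WeightedEdge_Create
-- ===== SOURCE A (Python) =====
-- def WeightedEdge_Create(datadict):
--     final_lst=[]
--     alrdy_traversed = []
--     for person in datadict.keys():
--         alrdy_traversed.append(person)
--         books_read=datadict[person]
--         for neighbor in datadict.keys():
--             weight=0
--             if neighbor in alrdy_traversed:
--                 continue
--             for n_books in datadict[neighbor].keys():
--                 if n_books in books_read.keys():
--                     currentchoice=books_read[n_books]
--                     neighborchoice=datadict[neighbor][n_books]
--                     if currentchoice==neighborchoice:
--                         weight+=1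
--                     else:
--                         weight-=1
--             if weight != 0:
--                 final_lst.append((person, neighbor, weight))
--
--     return final_lst
-- ===== SOURCE B (Python) =====
-- def WeightedEdge_Create(datadict):
--     # Invert by book: only co-readers of a book ever contribute to an edge.
--     persons = list(datadict)
--     readers = {}  # book -> [(person_index, rating)], indices increasing
--     for i, books in enumerate(datadict.values()):
--         for b, r in books.items():
--             readers[b] = readers.get(b, []) + [(i, r)]
--     w = {}  # (i, j) with i < j -> accumulated weight
--     for lst in readers.values():
--         for x, (i, ri) in enumerate(lst):
--             for j, rj in lst[x + 1:]:
--                 w[(i, j)] = w.get((i, j), 0) + (1 if ri == rj else -1)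
--     out = []
--     for i in range(len(persons)):
--         for j in range(i + 1, len(persons)):
--             wt = w.get((i, j), 0)
--             if wt != 0:
--                 out.append((persons[i], persons[j], wt))
--     return out
-- ===== Notes on version B (the rewrite author's own statement) =====
-- stated objective: faster
-- what changed: Instead of scanning every person pair and testing every book of the neighbor against the current person's dict, B inverts the data by book (book -> list of (person index, rating)), accumulates edge weights only over each book's co-reader pairs in a dict keyed by the ordered index pair, and then emits nonzero edges in index order.
import Mathlib
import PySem

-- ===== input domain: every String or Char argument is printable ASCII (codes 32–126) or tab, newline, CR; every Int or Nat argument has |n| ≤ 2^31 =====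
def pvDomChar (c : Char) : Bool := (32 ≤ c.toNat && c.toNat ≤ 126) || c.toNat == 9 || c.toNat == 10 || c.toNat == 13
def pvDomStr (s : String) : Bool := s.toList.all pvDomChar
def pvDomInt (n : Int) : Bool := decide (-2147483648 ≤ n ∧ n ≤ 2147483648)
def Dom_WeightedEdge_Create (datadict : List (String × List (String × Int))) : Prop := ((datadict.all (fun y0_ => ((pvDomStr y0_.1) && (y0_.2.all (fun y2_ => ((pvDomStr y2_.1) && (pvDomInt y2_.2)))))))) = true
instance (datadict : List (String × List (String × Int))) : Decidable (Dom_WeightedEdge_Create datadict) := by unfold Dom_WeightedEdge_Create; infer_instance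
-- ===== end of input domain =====

-- B inverts the data by book (accumulating edge weights only over each book's co-reader
-- list, keyed by index pair) instead of A's scan of every person pair against every book.

-- ===== PORT A =====
-- Literal port of A; the dict argument is the association list wrapped as PySem.Dict.
-- d[person] / d[neighbor] / books_read[k] are KeyError-free here (keys come from the
-- dicts themselves), so getD is exact for them.
def WeightedEdge_Create (datadict : List (String × List (String × Int))) : List (String × String × Int) :=
  let d : PySem.Dict String (List (String × Int)) := PySem.Dict.mk datadict
  let res := d.keys.foldl (fun (st : List (String × String × Int) × List String) person =>
    let alrdy_traversed := st.2 ++ [person]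
    let books_read : PySem.Dict String Int := PySem.Dict.mk (d.getD person [])
    let final_lst := d.keys.foldl (fun (fl : List (String × String × Int)) neighbor =>
      if alrdy_traversed.contains neighbor then fl
      else
        let nbooks : PySem.Dict String Int := PySem.Dict.mk (d.getD neighbor [])
        let weight : Int := nbooks.keys.foldl (fun (w : Int) n_books =>
          if books_read.contains n_books then
            if books_read.getD n_books 0 == nbooks.getD n_books 0 then w + 1 else w - 1
          else w) 0
        if weight ≠ 0 then fl ++ [(person, neighbor, weight)] else fl) st.1
    (final_lst, alrdy_traversed)) ([], [])
  res.1

-- ===== PORT B =====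
-- Literal port of Source B. persons[i]/persons[j] (0 ≤ i < j < len) are ported with getD;
-- lst[x+1:] is PySem.List.slice; w[(i,j)] = w.get((i,j),0) + δ and
-- readers[b] = readers.get(b,[]) + [..] are Dict.modify with the matching default.
def WeightedEdge_Create_alt (datadict : List (String × List (String × Int))) : List (String × String × Int) :=
  let persons := datadict.map Prod.fst
  let readers : PySem.Dict String (List (Int × Int)) :=
    (PySem.List.enumerate (datadict.map Prod.snd)).foldl (fun rd ib =>
      ib.2.foldl (fun rd br => rd.modify br.1 [] (· ++ [(ib.1, br.2)])) rd) PySem.Dict.empty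
  let w : PySem.Dict (Int × Int) Int :=
    readers.values.foldl (fun w lst =>
      (PySem.List.enumerate lst).foldl (fun w xp =>
        (PySem.List.slice lst (some (xp.1 + 1))).foldl (fun w jr =>
          w.modify (xp.2.1, jr.1) 0 (· + (if xp.2.2 == jr.2 then 1 else -1))) w) w) PySem.Dict.empty
  (List.range persons.length).foldl (fun out i =>
    (List.range' (i + 1) (persons.length - (i + 1))).foldl (fun out j =>
      let wt := w.getD (Int.ofNat i, Int.ofNat j) 0
      if wt ≠ 0 then out ++ [(persons.getD i "", persons.getD j "", wt)] else out) out) []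

-- ===== PRECONDITION & SPEC =====
-- A Python dict cannot present duplicate keys, so inputs whose association list
-- repeats a person key, or a book key inside one person's list, correspond to no
-- Python input; Pre_ excludes only those ambiguous lists.
def Pre_WeightedEdge_Create (datadict : List (String × List (String × Int))) : Prop :=
  (datadict.map Prod.fst).Nodup ∧ ∀ p ∈ datadict, (p.2.map Prod.fst).Nodup
instance (datadict : List (String × List (String × Int))) : Decidable (Pre_WeightedEdge_Create datadict) := by unfold Pre_WeightedEdge_Create; infer_instance

def pvWitness_WeightedEdge_Create : (List (String × List (String × Int))) :=
  [("alice", [("b1", 1), ("b2", 2)]), ("bob", [("b1", 1), ("b2", 0)])]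

def Spec_WeightedEdge_Create (datadict : List (String × List (String × Int))) (out : List (String × String × Int)) : Prop := out = WeightedEdge_Create_alt datadict
instance (datadict : List (String × List (String × Int))) (out : List (String × String × Int)) : Decidable (Spec_WeightedEdge_Create datadict out) := by unfold Spec_WeightedEdge_Create; infer_instance

-- ===== CLAIM (what is proved, stated in full; the proofs are below) =====
def Claim_equal_WeightedEdge_Create : Prop := ∀ (datadict : List (String × List (String × Int))), Dom_WeightedEdge_Create datadict → Pre_WeightedEdge_Create datadict → Spec_WeightedEdge_Create datadict (WeightedEdge_Create datadict)

-- ===== LEMMAS AND PROOFS =====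

-- shorthands for indexed access to the input
def pvPd : String × List (String × Int) := ("", [])
def pvPers (d : List (String × List (String × Int))) (i : Nat) : String := (d.getD i pvPd).1
def pvBks (d : List (String × List (String × Int))) (i : Nat) : List (String × Int) := (d.getD i pvPd).2
def pvKeys (bs : List (String × Int)) : List String := bs.map Prod.fst
def pvRate (bs : List (String × Int)) (b : String) : Int := (PySem.Dict.mk bs).getD b 0
-- the contribution of book b to the edge weight between book lists bi and bj
def pvT (bi bj : List (String × Int)) (b : String) : Int :=
  if b ∈ pvKeys bi then (if pvRate bi b == pvRate bj b then 1 else -1) else 0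
-- the weight of the edge between book lists bi and bj
def pvW (bi bj : List (String × Int)) : Int := ((pvKeys bj).map (pvT bi bj)).sum
def pvEmit (d : List (String × List (String × Int))) (i j : Nat) : List (String × String × Int) :=
  if pvW (pvBks d i) (pvBks d j) ≠ 0 then [(pvPers d i, pvPers d j, pvW (pvBks d i) (pvBks d j))] else []
-- the common characterisation both ports are reduced to
def pvCanon (d : List (String × List (String × Int))) : List (String × String × Int) :=
  (List.range d.length).flatMap (fun i =>
    (List.range' (i + 1) (d.length - (i + 1))).flatMap (fun j => pvEmit d i j))

-- generic list facts
theorem pv_list_eq_range_map {α : Type} (l : List α) (dflt : α) :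
    l = (List.range l.length).map (fun i => l.getD i dflt) := by
  apply List.ext_getElem (by simp)
  intro i h1 h2
  simp [List.getElem?_eq_getElem h1]

theorem pv_flatMap_if_singleton {α β : Type} (l : List α) (p : α → Bool) (g : α → β) :
    (l.flatMap (fun x => if p x then [g x] else [])) = (l.filter p).map g := by
  induction l with
  | nil => rfl
  | cons a t ih => by_cases h : p a <;> simp [h, ih]

theorem pv_mem_take_iff {l : List String} (h : l.Nodup) {j k : Nat} (hj : j < l.length) :
    l.getD j "" ∈ l.take k ↔ j < k := by
  rw [List.getD_eq_getElem l "" hj]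
  constructor
  · intro hm
    rcases List.mem_take_iff_getElem.mp hm with ⟨m, hm2, he⟩
    have hmj : m = j := by
      have := (List.Nodup.getElem_inj_iff h).mp he
      omega
    omega
  · intro hk
    have hjl : j < (l.take k).length := by simp; omega
    have : (l.take k)[j] = l[j] := List.getElem_take
    rw [← this]
    exact List.getElem_mem hjl

theorem pv_keys_mk {ν : Type} (l : List (String × ν)) :
    (PySem.Dict.mk l).keys = l.map Prod.fst := rfl

theorem pv_pers_eq (d : List (String × List (String × Int))) {i : Nat} (hi : i < d.length) :
    (d.map Prod.fst).getD i "" = pvPers d i := by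
  rw [List.getD_eq_getElem _ "" (by simpa using hi), List.getElem_map]
  simp [pvPers, List.getD, List.getElem?_eq_getElem hi]

theorem pv_lookup_idx (d : List (String × List (String × Int)))
    (h : (d.map Prod.fst).Nodup) {i : Nat} (hi : i < d.length) :
    (PySem.Dict.mk d).getD (pvPers d i) [] = pvBks d i := by
  have hmem : (pvPers d i, pvBks d i) ∈ (PySem.Dict.mk d).items := by
    show (pvPers d i, pvBks d i) ∈ d
    have : (pvPers d i, pvBks d i) = d.getD i pvPd := rfl
    rw [this, List.getD_eq_getElem d pvPd hi]
    exact List.getElem_mem hi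
  exact PySem.Dict.getD_of_mem_items _ hmem (by rw [pv_keys_mk]; exact h) []

-- ==== A-side ====
-- the port's loop bodies, named (definitionally equal to the port's let-bound lambdas)
def pvWeightA (books_read nbooks : PySem.Dict String Int) : Int :=
  nbooks.keys.foldl (fun (w : Int) n_books =>
    if books_read.contains n_books then
      if books_read.getD n_books 0 == nbooks.getD n_books 0 then w + 1 else w - 1
    else w) 0

def pvInnerA (d : List (String × List (String × Int))) (alrdy : List String) (person : String)
    (fl : List (String × String × Int)) (neighbor : String) : List (String × String × Int) :=
  if alrdy.contains neighbor then fl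
  else
    let weight := pvWeightA (PySem.Dict.mk ((PySem.Dict.mk d).getD person []))
      (PySem.Dict.mk ((PySem.Dict.mk d).getD neighbor []))
    if weight ≠ 0 then fl ++ [(person, neighbor, weight)] else fl

def pvOuterA (d : List (String × List (String × Int)))
    (st : List (String × String × Int) × List String) (person : String) :
    List (String × String × Int) × List String :=
  ((PySem.Dict.mk d).keys.foldl (pvInnerA d (st.2 ++ [person]) person) st.1, st.2 ++ [person])

theorem pvA_rfl (d : List (String × List (String × Int))) :
    WeightedEdge_Create d = ((d.map Prod.fst).foldl (pvOuterA d) ([], [])).1 := rfl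

theorem pv_weightA_eq (bi bj : List (String × Int)) :
    pvWeightA (PySem.Dict.mk bi) (PySem.Dict.mk bj) = pvW bi bj := by
  unfold pvWeightA
  rw [PySem.List.foldl_congr_mem _ _ (fun (w : Int) b => w + pvT bi bj b) 0 ?_]
  · rw [PySem.List.foldl_add, zero_add, pv_keys_mk]
    rfl
  · intro w b _
    simp only [pvT, pvRate]
    by_cases hc : (PySem.Dict.mk bi).contains b
    · have hm : b ∈ pvKeys bi := by
        have := (PySem.Dict.contains_iff_mem_keys _ b).mp hc
        rwa [pv_keys_mk] at this
      simp only [hc, if_true, hm]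
      split <;> omega
    · have hm : b ∉ pvKeys bi := by
        intro hx
        exact hc ((PySem.Dict.contains_iff_mem_keys _ b).mpr (by rwa [pv_keys_mk]))
      simp [hc, hm]

theorem pv_inner_eq (d : List (String × List (String × Int)))
    (h : (d.map Prod.fst).Nodup) {k : Nat} (hk : k ≤ d.length) {i : Nat} (hi : i < d.length)
    (acc : List (String × String × Int)) :
    (PySem.Dict.mk d).keys.foldl (pvInnerA d ((d.map Prod.fst).take k) (pvPers d i)) acc
    = acc ++ (List.range' k (d.length - k)).flatMap (fun j => pvEmit d i j) := by
  have hn : (d.map Prod.fst).length = d.length := by simp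
  have hL : (PySem.Dict.mk d).keys = (List.range d.length).map (fun j => (d.map Prod.fst).getD j "") := by
    rw [pv_keys_mk]
    conv_lhs => rw [pv_list_eq_range_map (d.map Prod.fst) ""]
    rw [hn]
  rw [hL, List.foldl_map]
  rw [PySem.List.foldl_congr_mem _ _ (fun fl j => if j < k then fl else fl ++ pvEmit d i j) acc ?_]
  · rw [List.range_eq_range']
    have hsplit : List.range' 0 d.length = List.range' 0 k ++ List.range' k (d.length - k) := by
      have h2 := List.range'_append (s := 0) (m := k) (n := d.length - k) (step := 1)
      simp only [Nat.zero_add, Nat.one_mul] at h2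
      rw [show k + (d.length - k) = d.length by omega] at h2
      rw [← h2]
    rw [hsplit, List.foldl_append]
    rw [PySem.List.foldl_congr_mem _ _ (fun fl _ => fl) acc ?_]
    · rw [PySem.List.foldl_ignore]
      rw [PySem.List.foldl_congr_mem _ _ (fun fl j => fl ++ pvEmit d i j) acc ?_]
      · rw [PySem.List.foldl_append_eq_flatMap]
      · intro fl j hj
        have : ¬ j < k := by
          have := List.mem_range'_1.mp hj
          omega
        simp [this]
    · intro fl j hj
      have : j < k := by
        have := List.mem_range'_1.mp hj
        omega
      simp [this]
  · intro fl j hj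
    simp only [List.mem_range] at hj
    rw [pv_pers_eq d hj]
    unfold pvInnerA
    rw [pv_lookup_idx d h hi, pv_lookup_idx d h hj, pv_weightA_eq]
    by_cases hjk : j < k
    · have hmem : pvPers d j ∈ (d.map Prod.fst).take k := by
        rw [← pv_pers_eq d hj]
        exact (pv_mem_take_iff h (by simpa using hj)).mpr hjk
      simp only [hjk, if_true]
      simp only [List.contains_eq_mem, hmem, decide_true, if_true]
    · have hmem : pvPers d j ∉ (d.map Prod.fst).take k := by
        rw [← pv_pers_eq d hj]
        intro hx
        exact hjk ((pv_mem_take_iff h (by simpa using hj)).mp hx)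
      have hcb : ((d.map Prod.fst).take k).contains (pvPers d j) = false := by
        simpa using hmem
      simp only [hcb, Bool.false_eq_true, if_false, hjk]
      unfold pvEmit
      split <;> simp

theorem pv_outer_eq (d : List (String × List (String × Int)))
    (h : (d.map Prod.fst).Nodup) : ∀ (m k : Nat), k + m = d.length → ∀ acc,
    ((List.range' k m).map (fun i => (d.map Prod.fst).getD i "")).foldl (pvOuterA d)
      (acc, (d.map Prod.fst).take k)
    = (acc ++ (List.range' k m).flatMap (fun i =>
        (List.range' (i + 1) (d.length - (i + 1))).flatMap (fun j => pvEmit d i j)),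
       (d.map Prod.fst).take (k + m)) := by
  intro m
  induction m with
  | zero => intro k hk acc; simp
  | succ m ih =>
    intro k hk acc
    have hkd : k < d.length := by omega
    rw [List.range'_succ, List.map_cons, List.foldl_cons]
    have htake : (d.map Prod.fst).take k ++ [(d.map Prod.fst).getD k ""] = (d.map Prod.fst).take (k + 1) := by
      rw [List.take_add_one]
      congr 1
      simp [List.getD, List.getElem?_eq_getElem (show k < (d.map Prod.fst).length by simpa using hkd)]
    have hstep : pvOuterA d (acc, (d.map Prod.fst).take k) ((d.map Prod.fst).getD k "") =
        (acc ++ (List.range' (k + 1) (d.length - (k + 1))).flatMap (fun j => pvEmit d k j),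
         (d.map Prod.fst).take (k + 1)) := by
      unfold pvOuterA
      simp only [htake]
      rw [pv_pers_eq d hkd, pv_inner_eq d h (by omega) hkd acc]
    rw [hstep, ih (k + 1) (by omega)]
    rw [show k + (m + 1) = (k + 1) + m by omega]
    simp [List.flatMap_cons]

theorem pvA_eq_canon (d : List (String × List (String × Int)))
    (h : (d.map Prod.fst).Nodup) : WeightedEdge_Create d = pvCanon d := by
  rw [pvA_rfl]
  have hn : (d.map Prod.fst).length = d.length := by simp
  have hL : (d.map Prod.fst) = (List.range' 0 d.length).map (fun j => (d.map Prod.fst).getD j "") := by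
    conv_lhs => rw [pv_list_eq_range_map (d.map Prod.fst) ""]
    rw [hn, List.range_eq_range']
  conv_lhs => rw [hL]
  rw [show (([], []) : List (String × String × Int) × List String)
      = (([] : List (String × String × Int)), (d.map Prod.fst).take 0) from rfl]
  rw [pv_outer_eq d h d.length 0 (by omega) []]
  simp [pvCanon, List.range_eq_range']

-- ==== B-side ====
-- the port's pipeline stages, named (definitionally equal to the port's let-bound terms)
def pvReadersB (d : List (String × List (String × Int))) : PySem.Dict String (List (Int × Int)) :=
  (PySem.List.enumerate (d.map Prod.snd)).foldl (fun rd ib =>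
    ib.2.foldl (fun rd br => rd.modify br.1 [] (· ++ [(ib.1, br.2)])) rd) PySem.Dict.empty

def pvWB (d : List (String × List (String × Int))) : PySem.Dict (Int × Int) Int :=
  (pvReadersB d).values.foldl (fun w lst =>
    (PySem.List.enumerate lst).foldl (fun w xp =>
      (PySem.List.slice lst (some (xp.1 + 1))).foldl (fun w jr =>
        w.modify (xp.2.1, jr.1) 0 (· + (if xp.2.2 == jr.2 then 1 else -1))) w) w) PySem.Dict.empty

theorem pvB_rfl (d : List (String × List (String × Int))) :
    WeightedEdge_Create_alt d =
    (List.range (d.map Prod.fst).length).foldl (fun out i =>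
      (List.range' (i + 1) ((d.map Prod.fst).length - (i + 1))).foldl (fun out j =>
        if (pvWB d).getD (Int.ofNat i, Int.ofNat j) 0 ≠ 0 then
          out ++ [((d.map Prod.fst).getD i "", (d.map Prod.fst).getD j "",
            (pvWB d).getD (Int.ofNat i, Int.ofNat j) 0)]
        else out) out) [] := rfl

theorem pv_enumerate_eq {α : Type} (dflt : α) (xs : List α) : ∀ (s : Int),
    PySem.List.enumerate xs s = (List.range xs.length).map (fun k : Nat => (s + (k : Int), xs.getD k dflt)) := by
  induction xs with
  | nil => intro s; rfl
  | cons a t ih =>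
    intro s
    rw [PySem.List.enumerate_cons, ih (s + 1)]
    rw [List.length_cons, List.range_succ_eq_map, List.map_cons, List.map_map]
    congr 1
    · simp
    · apply List.map_congr_left
      intro k _
      simp only [Function.comp_apply, List.getD_cons_succ]
      congr 1
      push_cast
      ring
theorem pv_bks_getD (d : List (String × List (String × Int))) {k : Nat} (hk : k < d.length) :
    (d.map Prod.snd).getD k [] = pvBks d k := by
  rw [List.getD_eq_getElem _ [] (by simpa using hk), List.getElem_map]
  simp [pvBks, List.getD, List.getElem?_eq_getElem hk]

-- the person/book/index triples, flattened in A's person order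
def pvLflat (d : List (String × List (String × Int))) : List (String × (Int × Int)) :=
  (List.range d.length).flatMap (fun i => (pvBks d i).map (fun br => (br.1, (Int.ofNat i, br.2))))

theorem pv_flatMap_congr {α β : Type} {l : List α} {f g : α → List β}
    (h : ∀ x ∈ l, f x = g x) : l.flatMap f = l.flatMap g := by
  induction l with
  | nil => rfl
  | cons a t ih =>
    simp only [List.flatMap_cons]
    rw [h a (by simp), ih (fun x hx => h x (by simp [hx]))]

theorem pv_readers_eq (d : List (String × List (String × Int))) :
    pvReadersB d = (pvLflat d).foldl (fun rd q => rd.modify q.1 [] (· ++ [q.2])) PySem.Dict.empty := by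
  unfold pvReadersB pvLflat
  rw [pv_enumerate_eq [] (d.map Prod.snd) 0, List.foldl_map, List.foldl_flatMap]
  rw [List.length_map]
  apply PySem.List.foldl_congr_mem
  intro rd k hk
  simp only [List.mem_range] at hk
  rw [pv_bks_getD d hk, List.foldl_map]
  apply PySem.List.foldl_congr_mem
  intro rd' br _
  norm_num

theorem pv_readers_getD (d : List (String × List (String × Int))) (b : String) :
    (pvReadersB d).getD b [] = ((pvLflat d).filter (fun q => q.1 == b)).map (fun q => q.2) := by
  rw [pv_readers_eq, PySem.Dict.getD_foldl_modify_append]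
  simp [PySem.Dict.getD_empty]

theorem pv_readers_keys (d : List (String × List (String × Int))) :
    (pvReadersB d).keys = PySem.Set.ofList ((pvLflat d).map Prod.fst) := by
  rw [pv_readers_eq]
  rw [PySem.Dict.keys_foldl_modify_key (pvLflat d) Prod.fst [] (fun _ q v => v ++ [q.2]) PySem.Dict.empty]
  exact PySem.Set.update_empty _

theorem pv_readers_keys_nodup (d : List (String × List (String × Int))) :
    (pvReadersB d).keys.Nodup := by
  rw [pv_readers_keys]; exact PySem.Set.nodup_ofList _

theorem pv_readers_values (d : List (String × List (String × Int))) :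
    (pvReadersB d).values = (pvReadersB d).keys.map (fun b => (pvReadersB d).getD b []) := by
  have h := PySem.Dict.items_eq_map_keys (pvReadersB d) (pv_readers_keys_nodup d) []
  show ((pvReadersB d).items).map (fun p => p.2) = _
  rw [h, List.map_map]
  rfl

-- the co-reader list of a book, by person index
def pvCo (d : List (String × List (String × Int))) (b : String) : List (Int × Int) :=
  ((List.range d.length).filter (fun i => decide (b ∈ pvKeys (pvBks d i)))).map
    (fun i => (Int.ofNat i, pvRate (pvBks d i) b))

theorem pv_assoc_filter (b : String) (bs : List (String × Int)) (hnd : (bs.map Prod.fst).Nodup) :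
    bs.filter (fun br => br.1 == b)
    = if b ∈ bs.map Prod.fst then [(b, (PySem.Dict.mk bs).getD b 0)] else [] := by
  induction bs with
  | nil => simp
  | cons kv t ih =>
    simp only [List.map_cons, List.nodup_cons] at hnd
    by_cases hkb : kv.1 = b
    · have hnt : b ∉ t.map Prod.fst := by rw [← hkb]; exact hnd.1
      have hft : t.filter (fun br => br.1 == b) = [] := by
        rw [List.filter_eq_nil_iff]
        intro br hbr
        simp only [beq_iff_eq]
        intro hbrb
        exact hnt (hbrb ▸ List.mem_map_of_mem hbr)
      have hget : (PySem.Dict.mk (kv :: t)).getD b 0 = kv.2 := by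
        apply PySem.Dict.getD_of_mem_items
        · show (b, kv.2) ∈ kv :: t
          rw [← hkb]
          simp
        · rw [pv_keys_mk]
          simp only [List.map_cons, List.nodup_cons]
          exact hnd
      rw [List.filter_cons_of_pos (by simp [hkb]), hft, hget]
      simp only [List.map_cons, List.mem_cons, hkb, true_or, if_true]
      rw [← hkb]
    · have hget : (PySem.Dict.mk (kv :: t)).getD b 0 = (PySem.Dict.mk t).getD b 0 := by
        simp [PySem.Dict.getD, PySem.Dict.get?, show (kv.1 == b) = false by simpa using hkb]
      rw [List.filter_cons_of_neg (by simpa using hkb), ih hnd.2, hget]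
      have hiff : (b ∈ (kv :: t).map Prod.fst) ↔ (b ∈ t.map Prod.fst) := by
        simp only [List.map_cons, List.mem_cons]
        constructor
        · rintro (h1 | h2)
          · exact absurd h1.symm hkb
          · exact h2
        · exact Or.inr
      rw [if_congr hiff rfl rfl]

theorem pv_co_eq (d : List (String × List (String × Int)))
    (h2 : ∀ p ∈ d, (p.2.map Prod.fst).Nodup) (b : String) :
    ((pvLflat d).filter (fun q => q.1 == b)).map (fun q => q.2) = pvCo d b := by
  unfold pvLflat pvCo
  rw [List.filter_flatMap, List.map_flatMap]
  rw [← pv_flatMap_if_singleton]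
  apply pv_flatMap_congr
  intro i hi
  simp only [List.mem_range] at hi
  have hmem : d.getD i pvPd ∈ d := by
    rw [List.getD_eq_getElem d pvPd hi]
    exact List.getElem_mem hi
  have hnd : ((pvBks d i).map Prod.fst).Nodup := h2 _ hmem
  rw [List.filter_map, List.map_map]
  have hp : ((fun q : String × Int × Int => q.1 == b) ∘ (fun br : String × Int => (br.1, (Int.ofNat i, br.2)))) = (fun br : String × Int => br.1 == b) := rfl
  rw [hp, pv_assoc_filter b _ hnd]
  by_cases hb : b ∈ (pvBks d i).map Prod.fst
  · have hb' : b ∈ pvKeys (pvBks d i) := hb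
    simp [hb, hb', pvRate]
  · have hb' : b ∉ pvKeys (pvBks d i) := hb
    simp [hb, hb']

-- all ordered position pairs of a co-reader list, with their weight contribution
def pvPairsOf : List (Int × Int) → List ((Int × Int) × Int)
  | [] => []
  | a :: t => t.map (fun jr => ((a.1, jr.1), if a.2 == jr.2 then (1 : Int) else -1)) ++ pvPairsOf t

theorem pv_enumerate_shift {α : Type} (xs : List α) : ∀ (s : Int),
    PySem.List.enumerate xs (s + 1) = (PySem.List.enumerate xs s).map (fun p => (p.1 + 1, p.2)) := by
  induction xs with
  | nil => intro s; rfl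
  | cons a t ih =>
    intro s
    rw [PySem.List.enumerate_cons, PySem.List.enumerate_cons, List.map_cons, ih (s + 1)]

theorem pv_pairFold_eq (lst : List (Int × Int)) : ∀ (w : PySem.Dict (Int × Int) Int),
    (PySem.List.enumerate lst).foldl (fun w xp =>
      (PySem.List.slice lst (some (xp.1 + 1))).foldl (fun w jr =>
        w.modify (xp.2.1, jr.1) 0 (· + (if xp.2.2 == jr.2 then 1 else -1))) w) w
    = (pvPairsOf lst).foldl (fun w q => w.modify q.1 0 (· + q.2)) w := by
  induction lst with
  | nil => intro w; rfl
  | cons a t ih =>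
    intro w
    rw [show pvPairsOf (a :: t)
        = t.map (fun jr => ((a.1, jr.1), if a.2 == jr.2 then (1 : Int) else -1)) ++ pvPairsOf t from rfl]
    rw [List.foldl_append]
    rw [PySem.List.enumerate_cons, List.foldl_cons]
    have hsl : PySem.List.slice (a :: t) (some ((0 : Int) + 1)) = t := by
      rw [PySem.List.slice_from _ (by norm_num)]
      norm_num
    rw [hsl]
    rw [pv_enumerate_shift t 0, List.foldl_map]
    rw [PySem.List.foldl_congr_mem _ _ (fun w xp =>
      (PySem.List.slice t (some (xp.1 + 1))).foldl (fun w jr =>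
        w.modify (xp.2.1, jr.1) 0 (· + (if xp.2.2 == jr.2 then 1 else -1))) w) _ ?_]
    · rw [ih, List.foldl_map]
    · intro w' xp hxp
      rcases (PySem.List.mem_enumerate_iff _ _ _).mp hxp with ⟨k, hk, hxpe⟩
      subst hxpe
      dsimp only
      have h1 : PySem.List.slice (a :: t) (some ((0 : Int) + k + 1 + 1)) = t.drop (k + 1) := by
        rw [PySem.List.slice_from _ (by omega)]
        have he : ((0 : Int) + k + 1 + 1).toNat = k + 2 := by omega
        rw [he]
        rfl
      have h2 : PySem.List.slice t (some ((0 : Int) + k + 1)) = t.drop (k + 1) := by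
        rw [PySem.List.slice_from _ (by omega)]
        have he : ((0 : Int) + k + 1).toNat = k + 1 := by omega
        rw [he]
      rw [h1, h2]

theorem pv_getD_foldl_modify_add (l : List ((Int × Int) × Int)) :
    ∀ (w0 : PySem.Dict (Int × Int) Int) (k : Int × Int),
    (l.foldl (fun w q => w.modify q.1 0 (· + q.2)) w0).getD k 0
    = w0.getD k 0 + ((l.filter (fun q => q.1 == k)).map (fun q => q.2)).sum := by
  induction l with
  | nil => intro w0 k; simp
  | cons q t ih =>
    intro w0 k
    rw [List.foldl_cons, ih]
    rw [PySem.Dict.getD_modify]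
    by_cases hk : k = q.1
    · rw [if_pos hk, List.filter_cons_of_pos (by simp [hk]), List.map_cons, List.sum_cons]
      subst hk
      ring
    · rw [if_neg hk, List.filter_cons_of_neg (by simp; exact fun h => hk h.symm)]

theorem pv_filter_eq_of_nodup (j : Nat) (t : List Nat) (hnd : t.Nodup) :
    t.filter (fun k => k == j) = if j ∈ t then [j] else [] := by
  induction t with
  | nil => simp
  | cons a u ih =>
    simp only [List.nodup_cons] at hnd
    by_cases haj : a = j
    · have hfu : u.filter (fun k => k == j) = [] := by
        rw [List.filter_eq_nil_iff]
        intro k hk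
        simp only [beq_iff_eq]
        intro hkj
        exact hnd.1 (by rw [haj, ← hkj]; exact hk)
      rw [List.filter_cons_of_pos (by simp [haj]), hfu]
      simp [haj]
    · rw [List.filter_cons_of_neg (by simpa using haj), ih hnd.2]
      have hiff : (j ∈ a :: u) ↔ (j ∈ u) := by
        simp only [List.mem_cons]
        constructor
        · rintro (h1 | h2)
          · exact absurd h1.symm haj
          · exact h2
        · exact Or.inr
      rw [if_congr hiff rfl rfl]

theorem pv_pairsOf_fst_mem (g : Nat → Int) : ∀ (t : List Nat),
    ∀ q ∈ pvPairsOf (t.map (fun k => (Int.ofNat k, g k))), ∃ k ∈ t, q.1.1 = Int.ofNat k := by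
  intro t
  induction t with
  | nil => intro q hq; simp [pvPairsOf] at hq
  | cons a u ih =>
    intro q hq
    rw [List.map_cons, show pvPairsOf ((Int.ofNat a, g a) :: u.map (fun k => (Int.ofNat k, g k)))
      = (u.map (fun k => (Int.ofNat k, g k))).map (fun jr => (((Int.ofNat a, g a).1, jr.1),
          if (Int.ofNat a, g a).2 == jr.2 then (1 : Int) else -1)) ++ pvPairsOf (u.map (fun k => (Int.ofNat k, g k))) from rfl,
      List.mem_append] at hq
    rcases hq with hq | hq
    · rcases List.mem_map.mp hq with ⟨jr, _, hje⟩
      exact ⟨a, by simp, by rw [← hje]⟩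
    · rcases ih q hq with ⟨k, hk, hke⟩
      exact ⟨k, by simp [hk], hke⟩

theorem pv_pairs_filter (g : Nat → Int) {i j : Nat} (hij : i < j) :
    ∀ (s : List Nat), s.Pairwise (· < ·) →
    ((pvPairsOf (s.map (fun k => (Int.ofNat k, g k)))).filter
        (fun q => q.1 == (Int.ofNat i, Int.ofNat j))).map (fun q => q.2)
    = if i ∈ s ∧ j ∈ s then [if g i == g j then (1 : Int) else -1] else [] := by
  intro s
  induction s with
  | nil => simp [pvPairsOf]
  | cons a t ih =>
    intro hp
    have ha := (List.pairwise_cons.mp hp).1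
    have ht := (List.pairwise_cons.mp hp).2
    have htnd : t.Nodup := ht.imp (fun h => Nat.ne_of_lt h)
    rw [List.map_cons, show pvPairsOf ((Int.ofNat a, g a) :: t.map (fun k => (Int.ofNat k, g k)))
      = (t.map (fun k => (Int.ofNat k, g k))).map (fun jr => (((Int.ofNat a, g a).1, jr.1),
          if (Int.ofNat a, g a).2 == jr.2 then (1 : Int) else -1)) ++ pvPairsOf (t.map (fun k => (Int.ofNat k, g k))) from rfl]
    rw [List.map_map, List.filter_append, List.map_append]
    have hblock1 : ((t.map ((fun jr => (((Int.ofNat a, g a).1, jr.1),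
          if (Int.ofNat a, g a).2 == jr.2 then (1 : Int) else -1)) ∘ (fun k => (Int.ofNat k, g k)))).filter
          (fun q => q.1 == (Int.ofNat i, Int.ofNat j))).map (fun q => q.2)
        = if a = i then (if j ∈ t then [if g i == g j then (1 : Int) else -1] else []) else [] := by
      rw [List.filter_map, List.map_map]
      by_cases hai : a = i
      · subst hai
        have hpred : ((fun q : (Int × Int) × Int => q.1 == (Int.ofNat a, Int.ofNat j)) ∘
            ((fun jr : Int × Int => (((Int.ofNat a, g a).1, jr.1),
              if (Int.ofNat a, g a).2 == jr.2 then (1 : Int) else -1)) ∘ (fun k => (Int.ofNat k, g k))))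
            = fun k : Nat => k == j := by
          funext k
          simp only [Function.comp_apply]
          simp [Prod.ext_iff]
        rw [hpred, pv_filter_eq_of_nodup j t htnd]
        by_cases hjt : j ∈ t <;> simp [hjt]
      · have hpred : ((fun q : (Int × Int) × Int => q.1 == (Int.ofNat i, Int.ofNat j)) ∘
            ((fun jr : Int × Int => (((Int.ofNat a, g a).1, jr.1),
              if (Int.ofNat a, g a).2 == jr.2 then (1 : Int) else -1)) ∘ (fun k => (Int.ofNat k, g k))))
            = fun _ : Nat => false := by
          funext k
          simp only [Function.comp_apply]
          simp [Prod.ext_iff]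
          intro hcon
          exact absurd hcon hai
        rw [hpred]
        simp [hai]
    rw [hblock1]
    by_cases hai : a = i
    · subst hai
      have hblock2 : (pvPairsOf (t.map (fun k => (Int.ofNat k, g k)))).filter
          (fun q => q.1 == (Int.ofNat a, Int.ofNat j)) = [] := by
        rw [List.filter_eq_nil_iff]
        intro q hq
        rcases pv_pairsOf_fst_mem g t q hq with ⟨k, hk, hke⟩
        simp only [beq_iff_eq]
        intro he
        have h1 : q.1.1 = Int.ofNat a := by rw [he]
        rw [hke] at h1
        have h2 : k = a := Int.ofNat.inj h1
        exact absurd (h2 ▸ ha k hk) (lt_irrefl a)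
      rw [hblock2]
      by_cases hjt : j ∈ t
      · have hmm : (a ∈ a :: t ∧ j ∈ a :: t) := ⟨by simp, by simp [hjt]⟩
        simp [hjt, hmm]
      · have hmm : ¬ (a ∈ a :: t ∧ j ∈ a :: t) := by
          rintro ⟨_, hj2⟩
          rcases List.mem_cons.mp hj2 with h1 | h2
          · omega
          · exact hjt h2
        simp [hjt]
        omega
    · rw [if_neg hai, ih ht]
      have hiff : (i ∈ a :: t ∧ j ∈ a :: t) ↔ (i ∈ t ∧ j ∈ t) := by
        constructor
        · rintro ⟨hi1, hj1⟩
          have hi2 : i ∈ t := by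
            rcases List.mem_cons.mp hi1 with h1 | h2
            · exact absurd h1.symm hai
            · exact h2
          refine ⟨hi2, ?_⟩
          rcases List.mem_cons.mp hj1 with h1 | h2
          · exfalso
            have := ha i hi2
            omega
          · exact h2
        · rintro ⟨hi2, hj2⟩
          exact ⟨by simp [hi2], by simp [hj2]⟩
      rw [if_congr hiff rfl rfl]
      simp


theorem pv_sum_transfer (l1 l2 : List String) (f g : String → Int) (h1 : l1.Nodup) (h2 : l2.Nodup)
    (hfg : ∀ b ∈ l1, f b = g b) (hf0 : ∀ b ∈ l1, b ∉ l2 → f b = 0)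
    (hg0 : ∀ b ∈ l2, b ∉ l1 → g b = 0) :
    (l1.map f).sum = (l2.map g).sum := by
  rw [← List.sum_toFinset f h1, ← List.sum_toFinset g h2]
  have hsub1 : l1.toFinset ∩ l2.toFinset ⊆ l1.toFinset := Finset.inter_subset_left
  have hsub2 : l1.toFinset ∩ l2.toFinset ⊆ l2.toFinset := Finset.inter_subset_right
  rw [← Finset.sum_subset hsub1 ?_, ← Finset.sum_subset hsub2 ?_]
  · apply Finset.sum_congr rfl
    intro b hb
    exact hfg b (List.mem_toFinset.mp (hsub1 hb))
  · intro x hx hnx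
    apply hg0 x (List.mem_toFinset.mp hx)
    intro hx1
    exact hnx (Finset.mem_inter.mpr ⟨List.mem_toFinset.mpr hx1, hx⟩)
  · intro x hx hnx
    apply hf0 x (List.mem_toFinset.mp hx)
    intro hx2
    exact hnx (Finset.mem_inter.mpr ⟨hx, List.mem_toFinset.mpr hx2⟩)

theorem pv_mem_BK (d : List (String × List (String × Int))) {j : Nat} (hj : j < d.length)
    {b : String} (hb : b ∈ pvKeys (pvBks d j)) : b ∈ (pvReadersB d).keys := by
  rw [pv_readers_keys, PySem.Set.mem_ofList]
  rcases List.mem_map.mp hb with ⟨br, hbr, hbe⟩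
  apply List.mem_map.mpr
  refine ⟨(br.1, (Int.ofNat j, br.2)), ?_, hbe⟩
  unfold pvLflat
  apply List.mem_flatMap.mpr
  exact ⟨j, by simp [hj], List.mem_map.mpr ⟨br, hbr, rfl⟩⟩

theorem pv_wB_getD (d : List (String × List (String × Int)))
    (h2 : ∀ p ∈ d, (p.2.map Prod.fst).Nodup) {i j : Nat} (hij : i < j) (hj : j < d.length) :
    (pvWB d).getD (Int.ofNat i, Int.ofNat j) 0 = pvW (pvBks d i) (pvBks d j) := by
  have hi : i < d.length := by omega
  unfold pvWB
  rw [pv_readers_values, List.foldl_map]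
  rw [PySem.List.foldl_congr_mem _ _ (fun w b =>
    (pvPairsOf (pvCo d b)).foldl (fun w q => w.modify q.1 0 (· + q.2)) w) PySem.Dict.empty ?_]
  · rw [← List.foldl_flatMap, pv_getD_foldl_modify_add]
    rw [show (PySem.Dict.empty : PySem.Dict (Int × Int) Int).getD (Int.ofNat i, Int.ofNat j) 0 = 0 from rfl,
      zero_add]
    rw [List.filter_flatMap, List.map_flatMap, List.flatMap_def, List.sum_flatten, List.map_map]
    have hterm : ∀ b ∈ (pvReadersB d).keys,
        (List.sum ∘ (fun b => ((pvPairsOf (pvCo d b)).filter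
          (fun q => q.1 == (Int.ofNat i, Int.ofNat j))).map (fun q => q.2))) b
        = (fun b => if b ∈ pvKeys (pvBks d i) ∧ b ∈ pvKeys (pvBks d j) then
            (if pvRate (pvBks d i) b == pvRate (pvBks d j) b then (1 : Int) else -1) else 0) b := by
      intro b _
      simp only [Function.comp_apply]
      unfold pvCo
      rw [pv_pairs_filter (fun k => pvRate (pvBks d k) b) hij _
        (List.Pairwise.sublist List.filter_sublist List.pairwise_lt_range)]
      have hmi : (i ∈ (List.range d.length).filter (fun i => decide (b ∈ pvKeys (pvBks d i))))
          ↔ b ∈ pvKeys (pvBks d i) := by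
        simp [List.mem_filter, hi]
      have hmj : (j ∈ (List.range d.length).filter (fun i => decide (b ∈ pvKeys (pvBks d i))))
          ↔ b ∈ pvKeys (pvBks d j) := by
        simp [List.mem_filter, hj]
      by_cases hc : b ∈ pvKeys (pvBks d i) ∧ b ∈ pvKeys (pvBks d j)
      · rw [if_pos ⟨hmi.mpr hc.1, hmj.mpr hc.2⟩, if_pos hc]
        simp
      · rw [if_neg (fun hm => hc ⟨hmi.mp hm.1, hmj.mp hm.2⟩), if_neg hc]
        simp
    rw [List.map_congr_left hterm]
    have hmemj : d.getD j pvPd ∈ d := by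
      rw [List.getD_eq_getElem d pvPd hj]
      exact List.getElem_mem hj
    have hndj : (pvKeys (pvBks d j)).Nodup := h2 _ hmemj
    unfold pvW
    refine (pv_sum_transfer _ _ _ _ hndj (pv_readers_keys_nodup d) ?_ ?_ ?_).symm
    · intro b hb
      by_cases hbi : b ∈ pvKeys (pvBks d i)
      · simp [pvT, hbi, hb]
      · simp [pvT, hbi]
    · intro b hb hnb
      exact absurd (pv_mem_BK d hj hb) hnb
    · intro b _ hnb
      rw [if_neg (fun hc => hnb hc.2)]
  · intro w b _
    rw [pv_readers_getD d b, pv_co_eq d h2 b, pv_pairFold_eq]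

theorem pvB_eq_canon (d : List (String × List (String × Int)))
    (h2 : ∀ p ∈ d, (p.2.map Prod.fst).Nodup) :
    WeightedEdge_Create_alt d = pvCanon d := by
  rw [pvB_rfl]
  have hn : (d.map Prod.fst).length = d.length := by simp
  rw [hn]
  rw [PySem.List.foldl_congr_mem _ _ (fun out i =>
    out ++ (List.range' (i + 1) (d.length - (i + 1))).flatMap (fun j => pvEmit d i j)) [] ?_]
  · rw [PySem.List.foldl_append_eq_flatMap]
    rfl
  · intro out i hi
    simp only [List.mem_range] at hi
    rw [PySem.List.foldl_congr_mem _ _ (fun out j => out ++ pvEmit d i j) out ?_]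
    · rw [PySem.List.foldl_append_eq_flatMap]
    · intro out' j hj
      rcases List.mem_range'_1.mp hj with ⟨hj1, hj2⟩
      have hij : i < j := by omega
      have hjd : j < d.length := by omega
      rw [pv_wB_getD d h2 hij hjd, pv_pers_eq d hi, pv_pers_eq d hjd]
      unfold pvEmit
      split <;> simp_all

-- ===== VERDICT (by name: the statement is the Claim_ definition above) =====
theorem WeightedEdge_Create_spec : Claim_equal_WeightedEdge_Create := by
  intro d _ hpre
  unfold Spec_WeightedEdge_Create
  rw [pvA_eq_canon d hpre.1, pvB_eq_canon d hpre.2]
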